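-- pv_equiv track=rewrite | github.com/SepAbs/Information-Retrieval-System-Developing-with-Spelling-Correction-and-Wildcard-Queries | Information Retrieval System Developing with Spelling Correction and Wildcard Queries.py | biGrams
-- ===== SOURCE A (Python) =====
-- def biGrams(String):
--     lessLengthWC, First, Last = len(String) - 1, String[0], String[-1]
--     if First != "*":
--         gramList = [f"${First}"]
--     else:
--         gramList = []
--
--     String = String.split("*")
--     for Element in String:
--         lengthElement = len(Element) - 1
--         for Index in range(lengthElement):
--             gramList.append(Element[Index : Index + 2])
--
--     if Last != "*":
--         gramList.append(f"{Last}$")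
--
--     return gramList
-- ===== SOURCE B (Python) =====
-- def biGrams(String):
--     First, Last = String[0], String[-1]
--     gramList = [f"${First}"] if First != "*" else []
--     for a, b in zip(String, String[1:]):
--         if a != "*" and b != "*":
--             gramList.append(a + b)
--     if Last != "*":
--         gramList.append(f"{Last}$")
--     return gramList
-- ===== Notes on version B (the rewrite author's own statement) =====
-- stated objective: simpler
-- what changed: B drops the split-on-'*' pass with its nested index loop and emits bigrams in one pass over adjacent character pairs, keeping a pair iff neither character is '*'.
import Mathlib
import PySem

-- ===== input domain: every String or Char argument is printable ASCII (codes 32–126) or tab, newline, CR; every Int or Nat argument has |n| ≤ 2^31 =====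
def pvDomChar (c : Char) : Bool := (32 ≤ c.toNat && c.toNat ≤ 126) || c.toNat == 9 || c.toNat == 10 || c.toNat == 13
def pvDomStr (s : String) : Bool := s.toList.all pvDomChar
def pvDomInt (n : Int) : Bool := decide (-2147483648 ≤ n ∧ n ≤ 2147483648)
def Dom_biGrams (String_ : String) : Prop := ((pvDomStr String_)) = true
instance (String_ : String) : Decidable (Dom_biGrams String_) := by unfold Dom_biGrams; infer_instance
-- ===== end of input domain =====

-- B replaces A's split-on-'*' plus nested index loop by one pass over adjacent character
-- pairs, keeping a bigram iff neither character is '*' (objective: simpler, same cost).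

-- ===== PORT A =====
-- Python chars are 1-char strings; here they are Char and f"${First}" is String.ofList ['$', First].
def biGrams (String_ : String) : List String :=
  match PySem.Str.pyGet? String_ 0, PySem.Str.pyGet? String_ (-1) with
  | some First, some Last =>
    let gramList : List String := if First ≠ '*' then [String.ofList ['$', First]] else []
    -- String.split("*"): PySem.Chars.splitOn on the char list (sep "*" is nonempty)
    let parts := PySem.Chars.splitOn String_.toList ['*']
    let gramList := parts.foldl (fun gl Element =>
      gl ++ (List.range (Element.length - 1)).map
        (fun (Index : ℕ) => String.ofList (PySem.List.slice Element (some (Index : Int)) (some ((Index : Int) + 2))))) gramList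
    if Last ≠ '*' then gramList ++ [String.ofList [Last, '$']] else gramList
  | _, _ => []  -- unreachable under Pre_: String[0] raises IndexError on ""

-- ===== PORT B =====
def biGrams_alt (String_ : String) : List String :=
  match PySem.Str.pyGet? String_ 0 with
  | none => []  -- unreachable under Pre_: String[0] raises IndexError on ""
  | some First =>
    match PySem.Str.pyGet? String_ (-1) with
    | none => []
    | some Last =>
      let start := if First ≠ '*' then [String.ofList ['$', First]] else []
      -- zip(String, String[1:]) with the filter, as one filterMap pass
      let mids := (String_.toList.zip (PySem.List.slice String_.toList (some 1) none)).filterMap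
        (fun p => if p.1 ≠ '*' ∧ p.2 ≠ '*' then some (String.ofList [p.1, p.2]) else none)
      start ++ mids ++ (if Last ≠ '*' then [String.ofList [Last, '$']] else [])

-- ===== PRECONDITION & SPEC =====
-- Pre_ excludes only the empty string, on which A raises IndexError at String[0].
def Pre_biGrams (String_ : String) : Prop := String_ ≠ ""
instance (String_ : String) : Decidable (Pre_biGrams String_) := by unfold Pre_biGrams; infer_instance
def pvWitness_biGrams : String := "mo*n"

def Spec_biGrams (String_ : String) (out : List String) : Prop := out = biGrams_alt String_
instance (String_ : String) (out : List String) : Decidable (Spec_biGrams String_ out) := by unfold Spec_biGrams; infer_instance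

-- ===== CLAIM =====
def Claim_equal_biGrams : Prop := ∀ (String_ : String), Dom_biGrams String_ → Pre_biGrams String_ → Spec_biGrams String_ (biGrams String_)

-- ===== LEMMAS AND PROOFS =====

-- splitOn.go with a single-char separator and enough fuel is splitOnP
theorem splitOn_go_singleton (c : Char) : ∀ (fuel : ℕ) (l cur : List Char) (acc : List (List Char)),
    l.length ≤ fuel →
    PySem.Chars.splitOn.go [c] fuel l cur acc
      = acc.reverse ++ (List.splitOnP (· == c) l).modifyHead (cur.reverse ++ ·)
  | 0, l, cur, acc, h => by
      have hl : l = [] := List.eq_nil_of_length_eq_zero (Nat.le_zero.mp h)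
      subst hl
      rw [PySem.Chars.splitOn.go.eq_def]
      simp [List.splitOnP_nil]
  | (f+1), [], cur, acc, _ => by
      rw [PySem.Chars.splitOn.go.eq_def]
      simp [List.splitOnP_nil]
  | (f+1), c' :: rest, cur, acc, h => by
      rw [PySem.Chars.splitOn.go.eq_def]
      simp only [List.isPrefixOf, Bool.and_true, List.length_cons] at *
      by_cases hc : c == c'
      · simp only [hc, if_pos, List.isPrefixOf, Bool.and_true, List.length_nil,
          List.length_cons, List.drop_succ_cons, List.drop_zero]
        rw [splitOn_go_singleton c f rest [] (cur.reverse :: acc) (by omega)]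
        have : (c' == c) = true := by simp_all [BEq.comm]
        rcases hsp : List.splitOnP (· == c) rest with _ | ⟨h0, t0⟩
        · exact absurd hsp (List.splitOnP_ne_nil _ _)
        · simp [List.splitOnP_cons, this, hsp]
      · simp only [hc, Bool.false_and, if_neg, Bool.false_eq_true, not_false_iff]
        rw [splitOn_go_singleton c f rest (c' :: cur) acc (by omega)]
        have hc' : (c' == c) = false := by simp_all [BEq.comm]
        rcases hsp : List.splitOnP (· == c) rest with _ | ⟨h0, t0⟩
        · exact absurd hsp (List.splitOnP_ne_nil _ _)
        · simp [List.splitOnP_cons, hc', hsp]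

theorem splitOn_singleton (s : List Char) (c : Char) :
    PySem.Chars.splitOn s [c] = List.splitOnP (· == c) s := by
  rw [PySem.Chars.splitOn, splitOn_go_singleton c (s.length + 1) s [] [] (by omega)]
  rcases hsp : List.splitOnP (· == c) s with _ | ⟨h0, t0⟩
  · exact absurd hsp (List.splitOnP_ne_nil _ _)
  · simp

-- the slice Element[i:i+2] is take 2 of drop i
theorem slice_two (e : List Char) (i : ℕ) :
    PySem.List.slice e (some (i : Int)) (some ((i : Int) + 2)) = (e.drop i).take 2 := by
  have h2 : ((i : Int) + 2) = (((i + 2 : ℕ)) : Int) := by push_cast; ring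
  rw [h2, PySem.List.slice_natCast]
  simp

-- the range-indexed bigrams of a list are its adjacent pairs
theorem range_take_two : ∀ (e : List Char),
    (List.range (e.length - 1)).map (fun i => (e.drop i).take 2)
      = (e.zip e.tail).map (fun p => [p.1, p.2])
  | [] => by simp
  | [x] => by simp
  | x :: y :: t => by
      have ih := range_take_two (y :: t)
      simp only [List.length_cons, Nat.add_sub_cancel, List.tail_cons] at ih ⊢
      rw [List.range_succ_eq_map, List.map_cons, List.map_map, List.zip_cons_cons,
        List.map_cons]
      refine congrArg₂ _ (by simp) ?_
      rw [← ih]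
      exact List.map_congr_left (fun i _ => by simp [Function.comp])

theorem slices_eq (e : List Char) :
    (List.range (e.length - 1)).map
        (fun (i : ℕ) => String.ofList (PySem.List.slice e (some (i : Int)) (some ((i : Int) + 2))))
      = (e.zip e.tail).map (fun p => String.ofList [p.1, p.2]) := by
  have h : (e.zip e.tail).map (fun p => String.ofList [p.1, p.2])
      = ((List.range (e.length - 1)).map (fun i => (e.drop i).take 2)).map String.ofList := by
    rw [range_take_two, List.map_map]; rfl
  rw [h, List.map_map]
  exact List.map_congr_left (fun i _ => by simp [Function.comp, slice_two])

-- bigrams of the '*'-split pieces are exactly the star-free adjacent pairs, in order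
theorem core : ∀ (s : List Char),
    (List.splitOnP (· == '*') s).flatMap (fun e => (e.zip e.tail).map (fun p => String.ofList [p.1, p.2]))
      = (s.zip s.tail).filterMap
          (fun p => if p.1 ≠ '*' ∧ p.2 ≠ '*' then some (String.ofList [p.1, p.2]) else none)
  | [] => by simp [List.splitOnP_nil]
  | [x] => by
      by_cases hx : x = '*' <;> simp [List.splitOnP_cons, List.splitOnP_nil, hx]
  | x :: y :: t => by
      have ih := core (y :: t)
      by_cases hx : x = '*'
      · simp only [List.splitOnP_cons, hx, beq_self_eq_true, if_pos, List.flatMap_cons,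
          List.zip_nil_right, List.map_nil, List.nil_append] at *
        rw [ih]
        simp
      · have hxb : (x == '*') = false := by simp [hx]
        by_cases hy : y = '*'
        · subst hy
          simp only [List.splitOnP_cons, hxb, Bool.false_eq_true, if_neg, beq_self_eq_true,
            if_pos, not_false_iff, List.modifyHead_cons, List.flatMap_cons, List.tail_cons,
            List.tail_nil, List.zip_nil_right, List.map_nil, List.nil_append] at ih ⊢
          rw [ih]
          simp [List.zip_cons_cons, List.filterMap_cons]
        · have hyb : (y == '*') = false := by simp [hy]
          rcases hsp : List.splitOnP (· == '*') t with _ | ⟨h0, t0⟩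
          · exact absurd hsp (List.splitOnP_ne_nil _ _)
          · simp only [List.splitOnP_cons, hxb, hyb, Bool.false_eq_true, if_neg, hsp,
              not_false_iff, List.modifyHead_cons, List.flatMap_cons, List.zip_cons_cons,
              List.tail_cons, List.map_cons, List.filterMap_cons, List.cons_append] at ih ⊢
            rw [if_pos (show ¬x = '*' ∧ ¬y = '*' from ⟨hx, hy⟩)]
            rw [← ih]

-- A's middle loop, as one equation
theorem middle (s : List Char) (init : List String) :
    (PySem.Chars.splitOn s ['*']).foldl (fun gl Element =>
        gl ++ (List.range (Element.length - 1)).map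
          (fun (Index : ℕ) => String.ofList (PySem.List.slice Element (some (Index : Int)) (some ((Index : Int) + 2))))) init
      = init ++ (s.zip s.tail).filterMap
          (fun p => if p.1 ≠ '*' ∧ p.2 ≠ '*' then some (String.ofList [p.1, p.2]) else none) := by
  rw [PySem.List.foldl_append_eq_flatMap, splitOn_singleton]
  congr 1
  rw [← core s]
  exact List.flatMap_congr (fun e _ => slices_eq e)

-- ===== VERDICT =====
theorem biGrams_spec : Claim_equal_biGrams := by
  intro S _ hpre
  unfold Spec_biGrams biGrams biGrams_alt
  have hne : S.toList ≠ [] := by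
    intro h
    exact hpre (by rw [← String.ofList_toList (s := S), h])
  obtain ⟨c, cs, hS⟩ := List.exists_cons_of_ne_nil hne
  rcases hlast : S.toList.getLast? with _ | lst
  · rw [List.getLast?_eq_none_iff] at hlast; exact absurd hlast hne
  have h0 : PySem.Str.pyGet? S 0 = some c := by
    simp [PySem.Str.pyGet?, hS, PySem.List.pyGet?_zero_cons]
  have hm1 : PySem.Str.pyGet? S (-1) = some lst := by
    simp [PySem.Str.pyGet?, PySem.List.pyGet?_neg_one, hlast]
  rw [h0, hm1]
  simp only [middle S.toList, PySem.List.slice_from_one]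
  split_ifs <;> simp
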